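-- pv_equiv track=rewrite | github.com/braing8mes/6.009_labs | lab02/lab_current.py | victory_check
-- ===== SOURCE A (Python) =====
-- def victory_check(game):
--     """
--     Given a game representation (of the form returned from new_game), return
--     a Boolean: True if the given game satisfies the victory condition, and
--     False otherwise.
--     """
--     total = 0
--     for _ in (game):
--         for i in (_):
--             if ('computer' in i)^('target' in i):
--                 return False
--             if 'computer' in i:
--                 total+=1
--     if total == 0:
--         return False
--     return True
-- ===== SOURCE B (Python) =====
-- def victory_check(game):
--     comp = set()
--     targ = set()
--     for r, row in enumerate(game):
--         for c, cell in enumerate(row):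
--             if 'computer' in cell:
--                 comp.add((r, c))
--             if 'target' in cell:
--                 targ.add((r, c))
--     return bool(comp) and comp == targ
-- ===== Notes on version B (the rewrite author's own statement) =====
-- stated objective: alternative
-- what changed: Instead of judging each cell in place with an early return and a counter, B collects the coordinate sets of computer-cells and of target-cells and decides victory by one set comparison: nonempty(comp) and comp == targ.
import Mathlib
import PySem

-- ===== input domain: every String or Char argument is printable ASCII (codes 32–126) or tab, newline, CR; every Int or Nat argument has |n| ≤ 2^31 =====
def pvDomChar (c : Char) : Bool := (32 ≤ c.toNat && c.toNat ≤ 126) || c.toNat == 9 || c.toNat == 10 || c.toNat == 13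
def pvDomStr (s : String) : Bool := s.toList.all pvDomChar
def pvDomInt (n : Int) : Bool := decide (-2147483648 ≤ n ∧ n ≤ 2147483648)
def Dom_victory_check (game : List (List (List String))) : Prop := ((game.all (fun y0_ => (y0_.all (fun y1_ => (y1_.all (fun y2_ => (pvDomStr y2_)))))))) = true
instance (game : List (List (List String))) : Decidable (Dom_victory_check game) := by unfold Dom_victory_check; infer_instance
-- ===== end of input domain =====

-- B replaces A's in-place cell judging (early return + computer counter) by two coordinate
-- sets — comp = {(r,c) | 'computer' in cell}, targ = {(r,c) | 'target' in cell} — and one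
-- final set comparison: bool(comp) and comp == targ (objective: alternative, same cost).

-- ===== PORT A =====
-- inner 'for i in _' loop: none = the early 'return False', some t = updated total
def vcRowA (cells : List (List String)) (total : Int) : Option Int :=
  match cells with
  | [] => some total
  | i :: rest =>
    if (i.contains "computer").xor (i.contains "target") then none
    else vcRowA rest (total + (if i.contains "computer" then 1 else 0))

-- outer 'for _ in game' loop
def vcGameA (rows : List (List (List String))) (total : Int) : Option Int :=
  match rows with
  | [] => some total
  | r :: rest =>
    match vcRowA r total with
    | none => none
    | some t => vcGameA rest t

def victory_check (game : List (List (List String))) : Bool :=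
  match vcGameA game 0 with
  | none => false
  | some total => if total == 0 then false else true

-- ===== PORT B =====
-- the body of B's inner loop: conditionally add (r, c) to comp and to targ
def vcStep (r : Int) (acc : PySem.Set (Int × Int) × PySem.Set (Int × Int))
    (q : Int × List String) : PySem.Set (Int × Int) × PySem.Set (Int × Int) :=
  let acc := if q.2.contains "computer" then (PySem.Set.add acc.1 (r, q.1), acc.2) else acc
  if q.2.contains "target" then (acc.1, PySem.Set.add acc.2 (r, q.1)) else acc

-- 'for c, cell in enumerate(row)'
def vcRowB (acc : PySem.Set (Int × Int) × PySem.Set (Int × Int))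
    (p : Int × List (List String)) : PySem.Set (Int × Int) × PySem.Set (Int × Int) :=
  (PySem.List.enumerate p.2).foldl (vcStep p.1) acc

def victory_check_alt (game : List (List (List String))) : Bool :=
  let st := (PySem.List.enumerate game).foldl vcRowB (PySem.Set.empty, PySem.Set.empty)
  !st.1.isEmpty && PySem.Set.equal st.1 st.2

-- ===== PRECONDITION & SPEC =====
def Spec_victory_check (game : List (List (List String))) (out : Bool) : Prop := out = victory_check_alt game
instance (game : List (List (List String))) (out : Bool) : Decidable (Spec_victory_check game out) := by unfold Spec_victory_check; infer_instance

-- ===== CLAIM (what is proved, stated in full; the proofs are below) =====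
def Claim_equal_victory_check : Prop := ∀ (game : List (List (List String))), Dom_victory_check game → Spec_victory_check game (victory_check game)

-- ===== LEMMAS AND PROOFS =====

def vcOk (cell : List String) : Bool := (cell.contains "computer") == (cell.contains "target")
def vcCc (cell : List String) : Bool := cell.contains "computer"
def vcTg (cell : List String) : Bool := cell.contains "target"

-- A's result in closed form
theorem vcRowA_spec (cells : List (List String)) (total : Int) :
    vcRowA cells total =
      if cells.all vcOk then some (total + (cells.countP vcCc : Int)) else none := by
  induction cells generalizing total with
  | nil => simp [vcRowA]
  | cons i rest ih =>
    rw [vcRowA]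
    cases hc : i.contains "computer" <;> cases ht : i.contains "target" <;>
      simp only [hc, ht, ih, List.all_cons, List.countP_cons, vcOk, vcCc,
        Bool.xor_false, Bool.xor_true, Bool.not_false, Bool.not_true,
        beq_self_eq_true, Bool.true_and, if_true] <;>
      first
        | rfl
        | (split_ifs <;> first | rfl | (congr 1; push_cast; ring) | simp_all)

theorem vcGameA_spec (rows : List (List (List String))) (total : Int) :
    vcGameA rows total =
      if (rows.flatMap (fun row => row)).all vcOk then
        some (total + ((rows.flatMap (fun row => row)).countP vcCc : Int)) else none := by
  induction rows generalizing total with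
  | nil => simp [vcGameA]
  | cons r rest ih =>
    simp only [vcGameA, vcRowA_spec, List.flatMap_cons, List.all_append, List.countP_append]
    by_cases h1 : r.all vcOk = true
    · simp only [h1, if_true, Bool.true_and]
      rw [ih]
      by_cases h2 : ((rest.flatMap (fun row => row)).all vcOk) = true
      · simp only [h2, if_true]
        congr 1
        push_cast
        ring
      · simp only [h2, Bool.false_eq_true, if_false]
    · simp [h1]

-- membership in the first component (comp) of B's inner fold
theorem vcRowB_mem_comp (r : Int) (row : List (List String)) (s : Int)
    (acc : PySem.Set (Int × Int) × PySem.Set (Int × Int)) (x : Int × Int) :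
    (x ∈ ((PySem.List.enumerate row s).foldl (vcStep r) acc).1) ↔
      x ∈ acc.1 ∨ ∃ (k : Nat) (hk : k < row.length),
        x = (r, s + k) ∧ vcCc (row[k]'hk) = true := by
  induction row generalizing s acc with
  | nil => simp [PySem.List.enumerate]
  | cons i rest ih =>
    rw [PySem.List.enumerate_cons, List.foldl_cons, ih]
    have hstep : (x ∈ (vcStep r acc (s, i)).1) ↔
        x ∈ acc.1 ∨ (x = (r, s) ∧ vcCc i = true) := by
      unfold vcStep vcCc
      cases hc : i.contains "computer" <;> cases ht : i.contains "target" <;>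
        simp [PySem.Set.mem_add, or_comm]
    rw [hstep]
    constructor
    · rintro ((h | h) | ⟨k, hk, hx, hc⟩)
      · exact Or.inl h
      · exact Or.inr ⟨0, by simp, by simpa using h.1, by simpa using h.2⟩
      · refine Or.inr ⟨k + 1, by simpa using hk, ?_, by simpa using hc⟩
        rw [hx]; congr 1; push_cast; ring
    · rintro (h | ⟨k, hk, hx, hc⟩)
      · exact Or.inl (Or.inl h)
      · cases k with
        | zero => exact Or.inl (Or.inr ⟨by simpa using hx, by simpa using hc⟩)
        | succ k =>
          refine Or.inr ⟨k, by simp only [List.length_cons] at hk; omega, ?_, by simpa using hc⟩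
          rw [hx]; congr 1; push_cast; ring

-- membership in the second component (targ) of B's inner fold
theorem vcRowB_mem_targ (r : Int) (row : List (List String)) (s : Int)
    (acc : PySem.Set (Int × Int) × PySem.Set (Int × Int)) (x : Int × Int) :
    (x ∈ ((PySem.List.enumerate row s).foldl (vcStep r) acc).2) ↔
      x ∈ acc.2 ∨ ∃ (k : Nat) (hk : k < row.length),
        x = (r, s + k) ∧ vcTg (row[k]'hk) = true := by
  induction row generalizing s acc with
  | nil => simp [PySem.List.enumerate]
  | cons i rest ih =>
    rw [PySem.List.enumerate_cons, List.foldl_cons, ih]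
    have hstep : (x ∈ (vcStep r acc (s, i)).2) ↔
        x ∈ acc.2 ∨ (x = (r, s) ∧ vcTg i = true) := by
      unfold vcStep vcTg
      cases hc : i.contains "computer" <;> cases ht : i.contains "target" <;>
        simp [PySem.Set.mem_add, or_comm]
    rw [hstep]
    constructor
    · rintro ((h | h) | ⟨k, hk, hx, hc⟩)
      · exact Or.inl h
      · exact Or.inr ⟨0, by simp, by simpa using h.1, by simpa using h.2⟩
      · refine Or.inr ⟨k + 1, by simpa using hk, ?_, by simpa using hc⟩
        rw [hx]; congr 1; push_cast; ring
    · rintro (h | ⟨k, hk, hx, hc⟩)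
      · exact Or.inl (Or.inl h)
      · cases k with
        | zero => exact Or.inl (Or.inr ⟨by simpa using hx, by simpa using hc⟩)
        | succ k =>
          refine Or.inr ⟨k, by simp only [List.length_cons] at hk; omega, ?_, by simpa using hc⟩
          rw [hx]; congr 1; push_cast; ring

-- membership in the components of B's outer fold
theorem vcGameB_mem (P : List String → Bool)
    (sel : PySem.Set (Int × Int) × PySem.Set (Int × Int) → PySem.Set (Int × Int))
    (hsel : ∀ (r : Int) (row : List (List String)) (s : Int) acc x, (x ∈ sel ((PySem.List.enumerate row s).foldl (vcStep r) acc)) ↔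
      x ∈ sel acc ∨ ∃ (k : Nat) (hk : k < row.length), x = (r, s + k) ∧ P (row[k]'hk) = true)
    (game : List (List (List String))) (s : Int)
    (acc : PySem.Set (Int × Int) × PySem.Set (Int × Int)) (x : Int × Int) :
    (x ∈ sel ((PySem.List.enumerate game s).foldl vcRowB acc)) ↔
      x ∈ sel acc ∨ ∃ (j : Nat) (hj : j < game.length) (k : Nat) (hk : k < (game[j]'hj).length),
        x = (s + j, (k : Int)) ∧ P ((game[j]'hj)[k]'hk) = true := by
  induction game generalizing s acc with
  | nil => simp [PySem.List.enumerate]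
  | cons row rest ih =>
    rw [PySem.List.enumerate_cons, List.foldl_cons, ih]
    have hrow := hsel s row 0 acc x
    rw [show vcRowB acc (s, row) = (PySem.List.enumerate row 0).foldl (vcStep s) acc from rfl, hrow]
    constructor
    · rintro ((h | ⟨k, hk, hx, hc⟩) | ⟨j, hj, k, hk, hx, hc⟩)
      · exact Or.inl h
      · exact Or.inr ⟨0, by simp, k, by simpa using hk, by simpa using hx, by simpa using hc⟩
      · refine Or.inr ⟨j + 1, by simpa using hj, k, by simpa using hk, ?_, by simpa using hc⟩
        rw [hx]; congr 1; push_cast; ring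
    · rintro (h | ⟨j, hj, k, hk, hx, hc⟩)
      · exact Or.inl (Or.inl h)
      · cases j with
        | zero =>
          exact Or.inl (Or.inr ⟨k, by simpa using hk, by simpa using hx, by simpa using hc⟩)
        | succ j =>
          refine Or.inr ⟨j, by simp only [List.length_cons] at hj; omega, k, by simpa using hk, ?_, by simpa using hc⟩
          rw [hx]; congr 1; push_cast; ring

-- A's all/any over the flattened cells, in index form
theorem all_flat_iff (game : List (List (List String))) (p : List String → Bool) :
    ((game.flatMap (fun row => row)).all p = true) ↔
      ∀ (j : Nat) (hj : j < game.length) (k : Nat) (hk : k < (game[j]'hj).length),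
        p ((game[j]'hj)[k]'hk) = true := by
  simp only [List.all_eq_true, List.mem_flatMap]
  constructor
  · intro h j hj k hk
    exact h _ ⟨game[j]'hj, List.getElem_mem hj, List.getElem_mem hk⟩
  · rintro h cell ⟨row, hrow, hcell⟩
    obtain ⟨j, hj, rfl⟩ := List.mem_iff_getElem.mp hrow
    obtain ⟨k, hk, rfl⟩ := List.mem_iff_getElem.mp hcell
    exact h j hj k hk

theorem any_flat_iff (game : List (List (List String))) (p : List String → Bool) :
    ((game.flatMap (fun row => row)).any p = true) ↔
      ∃ (j : Nat) (hj : j < game.length) (k : Nat) (hk : k < (game[j]'hj).length),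
        p ((game[j]'hj)[k]'hk) = true := by
  simp only [List.any_eq_true, List.mem_flatMap]
  constructor
  · rintro ⟨cell, ⟨row, hrow, hcell⟩, hp⟩
    obtain ⟨j, hj, rfl⟩ := List.mem_iff_getElem.mp hrow
    obtain ⟨k, hk, rfl⟩ := List.mem_iff_getElem.mp hcell
    exact ⟨j, hj, k, hk, hp⟩
  · rintro ⟨j, hj, k, hk, hp⟩
    exact ⟨_, ⟨game[j]'hj, List.getElem_mem hj, List.getElem_mem hk⟩, hp⟩

-- A in closed form: all cells consistent AND some cell has a computer
theorem vcA_closed (game : List (List (List String))) :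
    victory_check game =
      ((game.flatMap (fun row => row)).all vcOk && (game.flatMap (fun row => row)).any vcCc) := by
  unfold victory_check
  rw [vcGameA_spec]
  set cells := game.flatMap (fun row => row) with hc
  by_cases hall : cells.all vcOk = true
  · simp only [hall, if_true, Bool.true_and]
    by_cases h0 : cells.countP vcCc = 0
    · have hany : cells.any vcCc = false := by
        rw [List.any_eq_false]
        intro a ha
        simpa using List.countP_eq_zero.mp h0 a ha
      simp [h0, hany]
    · have hex : ∃ x ∈ cells, vcCc x = true := List.countP_pos_iff.mp (Nat.pos_of_ne_zero h0)
      have hany : cells.any vcCc = true := List.any_eq_true.mpr hex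
      have hne : ((0:Int) + (cells.countP vcCc : Int) == 0) = false := by
        simp only [beq_eq_false_iff_ne, ne_eq]
        omega
      simp only [hne, Bool.false_eq_true, if_false, hany]
  · have hall' : cells.all vcOk = false := eq_false_of_ne_true hall
    simp [hall']

-- ===== VERDICT (by name: the statement is the Claim_ definition above) =====
theorem victory_check_spec : Claim_equal_victory_check := by
  unfold Claim_equal_victory_check
  intro game _
  unfold Spec_victory_check
  rw [Bool.eq_iff_iff]
  -- characterize B
  have hcomp : ∀ x, (x ∈ ((PySem.List.enumerate game).foldl vcRowB
        (PySem.Set.empty, PySem.Set.empty)).1) ↔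
      ∃ (j : Nat) (hj : j < game.length) (k : Nat) (hk : k < (game[j]'hj).length),
        x = ((j : Int), (k : Int)) ∧ vcCc ((game[j]'hj)[k]'hk) = true := by
    intro x
    have := vcGameB_mem vcCc (fun a => a.1)
      (fun r row s acc x => vcRowB_mem_comp r row s acc x) game 0
      (PySem.Set.empty, PySem.Set.empty) x
    simpa [PySem.Set.empty] using this
  have htarg : ∀ x, (x ∈ ((PySem.List.enumerate game).foldl vcRowB
        (PySem.Set.empty, PySem.Set.empty)).2) ↔
      ∃ (j : Nat) (hj : j < game.length) (k : Nat) (hk : k < (game[j]'hj).length),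
        x = ((j : Int), (k : Int)) ∧ vcTg ((game[j]'hj)[k]'hk) = true := by
    intro x
    have := vcGameB_mem vcTg (fun a => a.2)
      (fun r row s acc x => vcRowB_mem_targ r row s acc x) game 0
      (PySem.Set.empty, PySem.Set.empty) x
    simpa [PySem.Set.empty] using this
  have hB : victory_check_alt game = true ↔
      ((∃ x, x ∈ ((PySem.List.enumerate game).foldl vcRowB (PySem.Set.empty, PySem.Set.empty)).1) ∧
       (∀ x, (x ∈ ((PySem.List.enumerate game).foldl vcRowB (PySem.Set.empty, PySem.Set.empty)).1) ↔
             (x ∈ ((PySem.List.enumerate game).foldl vcRowB (PySem.Set.empty, PySem.Set.empty)).2))) := by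
    unfold victory_check_alt
    rw [Bool.and_eq_true, PySem.Set.equal_iff, Bool.not_eq_true', List.isEmpty_eq_false_iff_exists_mem]
  -- characterize A
  have hA : victory_check game = true ↔
      ((game.flatMap (fun row => row)).all vcOk = true ∧
       (game.flatMap (fun row => row)).any vcCc = true) := by
    rw [vcA_closed, Bool.and_eq_true]
  rw [hA, hB]
  rw [all_flat_iff, any_flat_iff]
  constructor
  · rintro ⟨hok, j, hj, k, hk, hc⟩
    refine ⟨⟨((j : Int), (k : Int)), (hcomp _).mpr ⟨j, hj, k, hk, rfl, hc⟩⟩, ?_⟩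
    intro x
    rw [hcomp, htarg]
    constructor
    · rintro ⟨j', hj', k', hk', hx, hc'⟩
      refine ⟨j', hj', k', hk', hx, ?_⟩
      have := hok j' hj' k' hk'
      unfold vcOk at this; unfold vcCc at hc'; unfold vcTg
      rw [← (beq_iff_eq.mp this), hc']
    · rintro ⟨j', hj', k', hk', hx, ht'⟩
      refine ⟨j', hj', k', hk', hx, ?_⟩
      have := hok j' hj' k' hk'
      unfold vcOk at this; unfold vcTg at ht'; unfold vcCc
      rw [(beq_iff_eq.mp this), ht']
  · rintro ⟨⟨x, hx⟩, hiff⟩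
    obtain ⟨j, hj, k, hk, _, hc⟩ := (hcomp x).mp hx
    refine ⟨?_, j, hj, k, hk, hc⟩
    intro j' hj' k' hk'
    unfold vcOk
    rw [beq_iff_eq]
    cases hcv : vcCc ((game[j']'hj')[k']'hk') with
    | true =>
      have hin : (((j' : Int), (k' : Int)) : Int × Int) ∈
          ((PySem.List.enumerate game).foldl vcRowB (PySem.Set.empty, PySem.Set.empty)).1 :=
        (hcomp _).mpr ⟨j', hj', k', hk', rfl, hcv⟩
      obtain ⟨j2, hj2, k2, hk2, hx2, ht2⟩ := (htarg _).mp ((hiff _).mp hin)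
      have hj2e : j2 = j' := by
        have := congrArg Prod.fst hx2; simp at this; omega
      have hk2e : k2 = k' := by
        have := congrArg Prod.snd hx2; simp at this; omega
      subst hj2e; subst hk2e
      unfold vcCc at hcv; unfold vcTg at ht2
      rw [hcv, ht2]
    | false =>
      cases htv : vcTg ((game[j']'hj')[k']'hk') with
      | false => unfold vcCc at hcv; unfold vcTg at htv; rw [hcv, htv]
      | true =>
        have hin : (((j' : Int), (k' : Int)) : Int × Int) ∈
            ((PySem.List.enumerate game).foldl vcRowB (PySem.Set.empty, PySem.Set.empty)).2 :=
          (htarg _).mpr ⟨j', hj', k', hk', rfl, htv⟩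
        obtain ⟨j2, hj2, k2, hk2, hx2, hc2⟩ := (hcomp _).mp ((hiff _).mpr hin)
        have hj2e : j2 = j' := by
          have := congrArg Prod.fst hx2; simp at this; omega
        have hk2e : k2 = k' := by
          have := congrArg Prod.snd hx2; simp at this; omega
        subst hj2e; subst hk2e
        rw [hcv] at hc2
        exact absurd hc2 (by simp)
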